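-- pv_equiv track=rewrite | github.com/Austin-Long/CS5 | HW9/hw9pr1/hw9pr1.py | innerCells
-- ===== SOURCE A (Python) =====
-- def createOneRow(width):
--     """ returns one row of zeros of width "width"...
--          You might use this in your createBoard(width, height) function """
--     row = []
--     for col in range(width):
--         row += [0]
--     return row
--
-- def createBoard(width, height):
--     """returns a new 2D list of height rows and width columns,
--         all data elements are 0"""
--     A = []
--     for row in range(height):
--         A += [createOneRow(width)]
--     return A
--
-- def innerCells(w, h):
--     """returns a 2D array that has all live cells-with a value of 1-except
--        for a one-cell wide border of empty cells around the 2D array"""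
--     A = createBoard(w, h)
--
--     for row in range(1, h-1):
--         for col in range(1, w-1):
--             if row == h-1:
--                 A[row][col] = 0
--             elif col == w-1:
--                 A[row][col] = 0
--             else:
--                 A[row][col] = 1
--     return A
-- ===== SOURCE B (Python) =====
-- def innerCells(w, h):
--     """returns a 2D array that has all live cells-with a value of 1-except
--        for a one-cell wide border of empty cells around the 2D array"""
--     A = [[1] * w for _ in range(h)]
--     if A:
--         A[0] = [0] * w
--         A[-1] = [0] * w
--     for row in A:
--         if row:
--             row[0] = 0
--             row[-1] = 0
--     return A
-- ===== Notes on version B (the rewrite author's own statement) =====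
-- stated objective: faster
-- what changed: A builds an all-zero board element by element and marks the interior cells 1 with a nested Python loop; B builds all-ones rows with C-level list repetition and then clears only the border (two whole rows plus the first and last cell of every row).
import Mathlib
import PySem

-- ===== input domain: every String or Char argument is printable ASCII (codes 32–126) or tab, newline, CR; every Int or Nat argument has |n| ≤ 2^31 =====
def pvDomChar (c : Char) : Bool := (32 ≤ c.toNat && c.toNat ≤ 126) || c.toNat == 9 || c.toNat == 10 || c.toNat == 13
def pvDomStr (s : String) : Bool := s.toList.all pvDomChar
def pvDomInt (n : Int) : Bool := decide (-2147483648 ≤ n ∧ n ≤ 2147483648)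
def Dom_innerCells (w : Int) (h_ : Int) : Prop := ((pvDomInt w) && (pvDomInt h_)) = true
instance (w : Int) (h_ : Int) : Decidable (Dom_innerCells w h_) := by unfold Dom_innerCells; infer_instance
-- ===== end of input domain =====

-- B builds the all-ones board with list repetition and clears only the border, instead of A's
-- cell-by-cell zero board plus a nested interior-marking loop (objective: faster, constant-factor).

-- ===== PORT A =====
def createOneRow (width : Int) : List Int :=
  (PySem.List.pyRange 0 width 1).foldl (fun row _col => row ++ [(0 : Int)]) []

def createBoard (width : Int) (height : Int) : List (List Int) :=
  (PySem.List.pyRange 0 height 1).foldl (fun A _row => A ++ [createOneRow width]) []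

-- A[row][col] = v ; row and col are nonnegative and in range inside A's loops, where pyGetD/pySetD are exact
def pvSetCell (A : List (List Int)) (row : Int) (col : Int) (v : Int) : List (List Int) :=
  PySem.List.pySetD A row (PySem.List.pySetD (PySem.List.pyGetD A row []) col v)

def innerCells (w : Int) (h_ : Int) : List (List Int) :=
  (PySem.List.pyRange 1 (h_ - 1) 1).foldl (fun A row =>
    (PySem.List.pyRange 1 (w - 1) 1).foldl (fun A col =>
      if row = h_ - 1 then pvSetCell A row col 0
      else if col = w - 1 then pvSetCell A row col 0
      else pvSetCell A row col 1) A) (createBoard w h_)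

-- ===== PORT B =====
-- [1]*w gives [] for w ≤ 0, hence List.replicate w.toNat; A[-1] = v and row[-1] = v are pySetD at -1
def innerCells_alt (w : Int) (h_ : Int) : List (List Int) :=
  let A := (PySem.List.pyRange 0 h_ 1).map (fun _ => List.replicate w.toNat (1 : Int))
  let A := if A = [] then A
           else PySem.List.pySetD (PySem.List.pySetD A 0 (List.replicate w.toNat 0)) (-1)
                  (List.replicate w.toNat 0)
  A.map (fun row => if row = [] then row
                    else PySem.List.pySetD (PySem.List.pySetD row 0 (0 : Int)) (-1) 0)

-- ===== PRECONDITION & SPEC =====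
def Spec_innerCells (w : Int) (h_ : Int) (out : List (List Int)) : Prop := out = innerCells_alt w h_
instance (w : Int) (h_ : Int) (out : List (List Int)) : Decidable (Spec_innerCells w h_ out) := by unfold Spec_innerCells; infer_instance

-- ===== CLAIM (what is proved, stated in full; the proofs are below) =====
def Claim_equal_innerCells : Prop := ∀ (w : Int) (h_ : Int), Dom_innerCells w h_ → Spec_innerCells w h_ (innerCells w h_)

-- ===== LEMMAS AND PROOFS =====

-- the common closed form both ports are reduced to
def pvRowG (w : Int) : List Int :=
  (List.range w.toNat).map (fun c => if c = 0 ∨ c = w.toNat - 1 then 0 else 1)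

def pvG (w : Int) (h_ : Int) : List (List Int) :=
  (List.range h_.toNat).map (fun r =>
    if r = 0 ∨ r = h_.toNat - 1 then List.replicate w.toNat 0 else pvRowG w)

theorem pvSetD_neg_one {α : Type} (l : List α) (v : α) (h : l ≠ []) :
    PySem.List.pySetD l (-1) v = l.set (l.length - 1) v := by
  simp [PySem.List.pySetD, PySem.List.pySet?, PySem.List.pyIdx?]
  rw [if_pos (by have := List.length_pos_of_ne_nil h; omega)]
  rfl

theorem pvMapConst {α : Type} (n : Int) (x : α) :
    (PySem.List.pyRange 0 n 1).map (fun _ => x) = List.replicate n.toNat x := by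
  rw [PySem.List.pyRange_one, List.map_map]
  simp [Function.comp_def, List.map_const']

theorem pvGetD_nonneg {α : Type} (xs : List α) (i : Int) (d : α) (h : 0 ≤ i) :
    PySem.List.pyGetD xs i d = xs.getD i.toNat d := by
  unfold PySem.List.pyGetD
  rw [PySem.List.pyGet?_of_nonneg (xs := xs) h, List.getD_eq_getElem?_getD]

theorem createOneRow_eq (width : Int) : createOneRow width = List.replicate width.toNat 0 := by
  unfold createOneRow
  rw [PySem.List.foldl_append_singleton_eq_map (fun _ => (0 : Int))]
  simpa using pvMapConst width (0 : Int)

theorem createBoard_eq (width height : Int) :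
    createBoard width height = List.replicate height.toNat (List.replicate width.toNat 0) := by
  unfold createBoard
  rw [PySem.List.foldl_append_singleton_eq_map (fun _ => createOneRow width)]
  simpa [createOneRow_eq] using pvMapConst height (createOneRow width)

theorem pvSetCell_eq (A : List (List Int)) (r c v : Int) (hr : 0 ≤ r) (hc : 0 ≤ c) :
    pvSetCell A r c v = A.set r.toNat ((A.getD r.toNat []).set c.toNat v) := by
  unfold pvSetCell
  rw [pvGetD_nonneg A r [] hr, PySem.List.pySetD_of_nonneg _ _ hc, PySem.List.pySetD_of_nonneg _ _ hr]

-- elementwise description of the column loop acting on one row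
theorem pvRowFold_getElem? (cs : List Int) (row : List Int) (v : Int)
    (h : ∀ c ∈ cs, 0 ≤ c ∧ c < (row.length : Int)) (k : Nat) :
    (cs.foldl (fun r c => PySem.List.pySetD r c v) row)[k]? =
      if (k : Int) ∈ cs then some v else row[k]? := by
  induction cs generalizing row with
  | nil => simp
  | cons c cs ih =>
    obtain ⟨hc0, hclt⟩ := h c (List.mem_cons_self)
    rw [List.foldl_cons, PySem.List.pySetD_of_nonneg _ _ hc0,
        ih _ (fun c' hc' => by
          have := h c' (List.mem_cons_of_mem _ hc'); simpa [List.length_set] using this)]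
    by_cases hk : (k : Int) ∈ cs
    · simp [hk]
    · have hlt : c.toNat < row.length := by omega
      by_cases hkc : k = c.toNat
      · subst hkc
        simp [hlt, show ((c.toNat : Int) = c) from by omega]
      · have h2 : ¬ ((k : Int) = c) := by omega
        have h3 : ¬ (c.toNat = k) := fun hh => hkc hh.symm
        simp [hk, h2, h3]

-- the column loop on row r only rewrites row r
theorem pvInnerFold_eq (cs : List Int) (A : List (List Int)) (r v : Int)
    (hr : 0 ≤ r) (hc : ∀ c ∈ cs, 0 ≤ c) :
    cs.foldl (fun A c => pvSetCell A r c v) A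
      = A.set r.toNat (cs.foldl (fun row c => PySem.List.pySetD row c v) (A.getD r.toNat [])) := by
  induction cs generalizing A with
  | nil =>
    simp only [List.foldl_nil]
    by_cases h : r.toNat < A.length
    · rw [List.getD_eq_getElem A [] h, List.set_getElem_self]
    · have hset : ∀ y, A.set r.toNat y = A := fun y => List.set_eq_of_length_le (by omega)
      simp [hset]
  | cons c cs ih =>
    simp only [List.foldl_cons]
    rw [pvSetCell_eq A r c v hr (hc c List.mem_cons_self),
        ih _ (fun c' hc' => hc c' (List.mem_cons_of_mem _ hc')),
        PySem.List.pySetD_of_nonneg _ _ (hc c List.mem_cons_self)]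
    by_cases h : r.toNat < A.length
    · rw [List.getD_eq_getElem A [] h]
      have hgd : (A.set r.toNat (A[r.toNat].set c.toNat v)).getD r.toNat []
          = A[r.toNat].set c.toNat v := by
        rw [List.getD_eq_getElem _ [] (by simp [h]), List.getElem_set_self]
      rw [hgd, List.set_set]
    · have hset : ∀ y, A.set r.toNat y = A := fun y => List.set_eq_of_length_le (by omega)
      simp [hset]

-- the row loop applies g to each listed row once (rows strictly increasing)
theorem pvOuterFold_getElem? (rs : List Int) (A : List (List Int)) (g : List Int → List Int)
    (hs : rs.Pairwise (· < ·)) (h0 : ∀ r ∈ rs, 0 ≤ r) (k : Nat) :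
    (rs.foldl (fun A r => A.set r.toNat (g (A.getD r.toNat []))) A)[k]? =
      if (k : Int) ∈ rs then (A[k]?).map g else A[k]? := by
  induction rs generalizing A with
  | nil => simp
  | cons r rs ih =>
    have hr0 := h0 r List.mem_cons_self
    rw [List.foldl_cons, ih _ (List.pairwise_cons.mp hs).2 (fun r' h' => h0 r' (List.mem_cons_of_mem _ h'))]
    by_cases hkr : (k : Int) = r
    · have hk : k = r.toNat := by omega
      have hnot : r ∉ rs := fun hm => by
        have := (List.pairwise_cons.mp hs).1 _ hm; omega
      subst hk
      by_cases h : r.toNat < A.length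
      · simp [hkr, hnot, List.getElem?_set, h, List.getD_eq_getElem A [] h]
      · rw [List.set_eq_of_length_le (by omega)]
        simp [hkr, hnot, List.getElem?_eq_none (by omega : A.length ≤ r.toNat)]
    · have hk : ¬ (r.toNat = k) := fun hh => hkr (by omega)
      have hset : (A.set r.toNat (g (A.getD r.toNat [])))[k]? = A[k]? := by
        simp [List.getElem?_set, hk]
      rw [hset]
      simp [List.mem_cons, hkr]

-- the column loop of A as a function of the row it acts on
def pvRowStep (w : Int) (row : List Int) : List Int :=
  (PySem.List.pyRange 1 (w - 1) 1).foldl (fun r c => PySem.List.pySetD r c 1) row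

-- the interior row A produces
theorem pvRowfold_zeros (w : Int) :
    pvRowStep w (List.replicate w.toNat 0) = pvRowG w := by
  unfold pvRowStep
  apply List.ext_getElem?
  intro k
  rw [pvRowFold_getElem? _ _ _ (fun c hc => by
    have := PySem.List.mem_pyRange_one.mp hc
    constructor
    · omega
    · simp only [List.length_replicate]; omega)]
  simp only [pvRowG, List.getElem?_map, List.getElem?_range, List.getElem?_replicate]
  by_cases hk : (k : Int) ∈ PySem.List.pyRange 1 (w - 1) 1
  · have := PySem.List.mem_pyRange_one.mp hk
    have h1 : k < w.toNat := by omega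
    have h2 : ¬ (k = 0 ∨ k = w.toNat - 1) := by omega
    simp [hk, h1, h2]
  · have hnm : ¬ (1 ≤ (k : Int) ∧ (k : Int) < w - 1) :=
      fun hab => hk (PySem.List.mem_pyRange_one.mpr hab)
    by_cases h1 : k < w.toNat
    · have h2 : k = 0 ∨ k = w.toNat - 1 := by omega
      simp [hk, h1, h2]
    · simp [hk, h1]

-- Port A equals the closed form
theorem innerCells_eq_pvG (w h_ : Int) : innerCells w h_ = pvG w h_ := by
  unfold innerCells
  rw [PySem.List.foldl_congr_mem _ _
      (fun A r => A.set r.toNat (pvRowStep w (A.getD r.toNat []))) _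
      (fun A r hr => by
        have hrr := PySem.List.mem_pyRange_one.mp hr
        rw [PySem.List.foldl_congr_mem _ _ (fun A c => pvSetCell A r c 1) _
            (fun acc c hc => by
              have hcc := PySem.List.mem_pyRange_one.mp hc
              rw [if_neg (by omega), if_neg (by omega)])]
        exact pvInnerFold_eq _ A r 1 (by omega)
          (fun c hc => by have := PySem.List.mem_pyRange_one.mp hc; omega))]
  apply List.ext_getElem?
  intro k
  rw [pvOuterFold_getElem? _ _ (pvRowStep w) (PySem.List.pairwise_lt_pyRange_one 1 (h_ - 1))
      (fun r hr => by have := PySem.List.mem_pyRange_one.mp hr; omega) k,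
      createBoard_eq]
  simp only [pvG, List.getElem?_map, List.getElem?_range, List.getElem?_replicate]
  by_cases hk : (k : Int) ∈ PySem.List.pyRange 1 (h_ - 1) 1
  · have := PySem.List.mem_pyRange_one.mp hk
    have h1 : k < h_.toNat := by omega
    have h2 : ¬ (k = 0 ∨ k = h_.toNat - 1) := by omega
    simp [hk, h1, h2, pvRowfold_zeros]
  · have hnm : ¬ (1 ≤ (k : Int) ∧ (k : Int) < h_ - 1) :=
      fun hab => hk (PySem.List.mem_pyRange_one.mpr hab)
    by_cases h1 : k < h_.toNat
    · have h2 : k = 0 ∨ k = h_.toNat - 1 := by omega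
      simp [hk, h1, h2]
    · simp [hk, h1]

-- clearing the ends of an all-zero row changes nothing
theorem pvBorderize_zeros (w : Int) :
    PySem.List.pySetD (PySem.List.pySetD (List.replicate w.toNat (0 : Int)) 0 0) (-1) 0
      = List.replicate w.toNat 0 := by
  by_cases h : List.replicate w.toNat (0 : Int) = []
  · simp [h, PySem.List.pySetD, PySem.List.pySet?, PySem.List.pyIdx?]
  · rw [show PySem.List.pySetD (List.replicate w.toNat (0 : Int)) 0 (0 : Int)
          = List.replicate w.toNat 0 from by
        rw [PySem.List.pySetD_of_nonneg _ _ (by norm_num), List.set_replicate_self],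
      pvSetD_neg_one _ _ h, List.set_replicate_self]

-- clearing the ends of an all-one row gives the interior row
theorem pvBorderize_ones (w : Int) (hw : 0 < w) :
    PySem.List.pySetD (PySem.List.pySetD (List.replicate w.toNat (1 : Int)) 0 0) (-1) 0
      = pvRowG w := by
  have h : List.replicate w.toNat (1 : Int) ≠ [] := by
    simp [List.replicate_eq_nil_iff]; omega
  have hi : PySem.List.pySetD (List.replicate w.toNat (1 : Int)) 0 (0 : Int)
      = (List.replicate w.toNat (1 : Int)).set 0 0 := by
    rw [PySem.List.pySetD_of_nonneg _ _ (by norm_num)]; rfl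
  rw [hi, pvSetD_neg_one _ _ (by simpa [List.set_eq_nil_iff] using h)]
  apply List.ext_getElem?
  intro k
  simp only [List.length_set, List.length_replicate, List.getElem?_set, List.getElem?_replicate,
    pvRowG, List.getElem?_map, List.getElem?_range]
  by_cases h1 : k < w.toNat
  · by_cases h2 : k = 0 ∨ k = w.toNat - 1
    · rcases h2 with h2 | h2 <;> simp_all
    · have hk0 : ¬ (0 = k) := by omega
      have hkl : ¬ (w.toNat - 1 = k) := by omega
      simp [h1, hk0, hkl, h2]
  · simp [h1, show ¬ (w.toNat - 1 = k) by omega, show ¬ (0 = k) by omega]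

-- Port B equals the closed form
theorem innerCells_alt_eq_pvG (w h_ : Int) : innerCells_alt w h_ = pvG w h_ := by
  unfold innerCells_alt
  dsimp only
  rw [pvMapConst]
  by_cases hH : h_.toNat = 0
  · simp [hH, pvG]
  · have hne : List.replicate h_.toNat (List.replicate w.toNat (1 : Int)) ≠ [] := by
      simp [List.replicate_eq_nil_iff]; omega
    have hi : PySem.List.pySetD (List.replicate h_.toNat (List.replicate w.toNat (1 : Int))) 0
          (List.replicate w.toNat 0)
        = (List.replicate h_.toNat (List.replicate w.toNat (1 : Int))).set 0
            (List.replicate w.toNat 0) := by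
      rw [PySem.List.pySetD_of_nonneg _ _ (by norm_num)]; rfl
    rw [if_neg hne, hi, pvSetD_neg_one _ _ (by simpa [List.set_eq_nil_iff] using hne)]
    apply List.ext_getElem?
    intro k
    simp only [List.getElem?_map, List.length_set, List.length_replicate, List.getElem?_set,
      List.getElem?_replicate, pvG, List.getElem?_range]
    by_cases h1 : k < h_.toNat
    · by_cases hk0 : k = 0
      · subst hk0
        by_cases hkl : h_.toNat - 1 = 0
        · simp [hkl, h1]
          exact fun _ => pvBorderize_zeros w
        · simp [hkl, h1]
          exact fun _ => pvBorderize_zeros w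
      · by_cases hkl : h_.toNat - 1 = k
        · subst hkl
          have hne0 : ¬ (0 = h_.toNat - 1) := fun hh => hk0 hh.symm
          simp [hne0, h1]
          exact fun _ => pvBorderize_zeros w
        · have hne0 : ¬ (0 = k) := fun hh => hk0 hh.symm
          have hnel : ¬ (k = h_.toNat - 1) := fun hh => hkl hh.symm
          simp only [hkl, hne0, h1, hk0, hnel, if_false, if_true, or_self, or_false, false_or,
            Option.map_some]
          have hrg : (List.range h_.toNat)[k]? = some k := by
            rw [List.getElem?_eq_getElem (by simpa using h1)]; simp
          by_cases hw : w ≤ 0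
          · simp [hw, hrg, pvRowG, show w.toNat = 0 by omega]
          · have hb := pvBorderize_ones w (by omega)
            simp [show ¬ (List.replicate w.toNat (1 : Int) = []) from by
              simp [List.replicate_eq_nil_iff]; omega, hb, hrg, hk0, hnel]
    · have hnl : ¬ (h_.toNat - 1 = k) := by omega
      have hn0 : ¬ (0 = k) := by omega
      simp [h1, hnl, hn0]

-- ===== VERDICT (by name: the statement is the Claim_ definition above) =====
theorem innerCells_spec : Claim_equal_innerCells := by
  intro w h_ _
  unfold Spec_innerCells
  rw [innerCells_eq_pvG, innerCells_alt_eq_pvG]
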